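-- pv_equiv track=rewrite | github.com/siqilu1/cs61a | cats/cats.py | pawssible_patches
-- ===== SOURCE A (Python) =====
-- def pawssible_patches(start, goal, limit):
--     """A diff function that computes the edit distance from START to GOAL.
--
--     >>> big_limit = 10
--     >>> pawssible_patches("cats", "scat", big_limit)       # cats -> scats -> scat
--     2
--     >>> pawssible_patches("purng", "purring", big_limit)   # purng -> purrng -> purring
--     2
--     >>> pawssible_patches("ckiteus", "kittens", big_limit) # ckiteus -> kiteus -> kitteus -> kittens
--     3
--
--     """
--
--     if start == goal: # Fill in the condition
--         return 0
--
--     elif len(start) == 0: # Feel free to remove or add additional cases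
--         return len(goal)
--
--     elif len(goal) == 0:
--         return len(start)
--
--     elif limit == 0:
--         return 1
--
--     else:
--         if start[0] != goal[0]:
--             add_diff = pawssible_patches(start, goal[1:], limit-1) + 1
--             remove_diff = pawssible_patches(start[1:], goal, limit-1) + 1
--             substitute_diff = pawssible_patches(start[1:], goal[1:], limit-1) + 1
--             return min(add_diff, remove_diff, substitute_diff)
--         else:
--             return pawssible_patches(start[1:], goal[1:], limit)
-- ===== SOURCE B (Python) =====
-- def pawssible_patches(start, goal, limit):
--     """Edit distance from START to GOAL, capped at LIMIT edits (beyond the cap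
--     the recursion stops with 1).  Memoized over (i, j, l); the limit is clamped
--     to n + m, beyond which (and for negative limits) the cap is unreachable."""
--     n, m = len(start), len(goal)
--     cap = limit if 0 <= limit <= n + m else n + m
--     memo = {}
--
--     def d(i, j, l):
--         key = (i, j, l)
--         if key not in memo:
--             if start[i:] == goal[j:]:
--                 r = 0
--             elif i == n:
--                 r = m - j
--             elif j == m:
--                 r = n - i
--             elif l == 0:
--                 r = 1
--             elif start[i] == goal[j]:
--                 r = d(i + 1, j + 1, l)
--             else:
--                 r = 1 + min(d(i, j + 1, l - 1), d(i + 1, j, l - 1), d(i + 1, j + 1, l - 1))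
--             memo[key] = r
--         return memo[key]
--
--     return d(0, 0, cap)
-- ===== Notes on version B (the rewrite author's own statement) =====
-- stated objective: alternative
-- what changed: Replaces A's naive branching recursion on string suffixes by a memoized recursion over (start_index, goal_index, limit) with the limit clamped to len(start)+len(goal), so each state is computed at most once (table-driven DP instead of a 3-way call tree).
import Mathlib
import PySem

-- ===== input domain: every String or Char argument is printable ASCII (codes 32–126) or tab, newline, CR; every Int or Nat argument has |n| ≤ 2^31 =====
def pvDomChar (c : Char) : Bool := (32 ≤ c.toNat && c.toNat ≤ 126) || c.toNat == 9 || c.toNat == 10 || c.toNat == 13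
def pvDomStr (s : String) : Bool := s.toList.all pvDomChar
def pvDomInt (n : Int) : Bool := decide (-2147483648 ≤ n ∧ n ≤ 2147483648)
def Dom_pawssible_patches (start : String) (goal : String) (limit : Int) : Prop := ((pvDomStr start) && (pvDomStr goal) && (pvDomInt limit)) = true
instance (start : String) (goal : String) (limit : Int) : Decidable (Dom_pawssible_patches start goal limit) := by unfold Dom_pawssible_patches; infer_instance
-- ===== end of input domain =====

-- B replaces A's naive branching recursion on string suffixes by a memoized
-- recursion over index pairs with the limit clamped to len(start)+len(goal);
-- return values are proved identical (objective: alternative).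

-- ===== PORT A =====
-- literal transliteration of A's recursion on the characters of start/goal;
-- start[1:], goal[1:] on a nonempty string are the tails, start[0] != goal[0] the
-- head comparison.  The Nat fuel only makes the recursion structural: it starts at
-- |start|+|goal| and every recursive call shrinks that measure, so 0 is never hit.
def pvFAgo : Nat → List Char → List Char → Int → Int
  | 0, _, _, _ => 0
  | fuel + 1, s, g, l =>
    if s = g then 0
    else match s, g with
      | [], g' => (g'.length : Int)
      | s', [] => (s'.length : Int)
      | a :: s', b :: g' =>
        if l = 0 then 1
        else if a ≠ b then
          min (min (pvFAgo fuel (a :: s') g' (l - 1) + 1) (pvFAgo fuel s' (b :: g') (l - 1) + 1))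
              (pvFAgo fuel s' g' (l - 1) + 1)
        else pvFAgo fuel s' g' l

def pawssible_patches (start : String) (goal : String) (limit : Int) : Int :=
  pvFAgo (start.toList.length + goal.toList.length) start.toList goal.toList limit

-- ===== PORT B =====
-- transliteration of Source B's memoized helper d(i, j, l) (the memo table only caches
-- values and is dropped); start[i:] with 0 ≤ i is List.drop i, `i == n` is written
-- `n ≤ i` (equivalent: i never exceeds n), start[i] with i < n is getD.  The Nat
-- fuel starts at (n-i)+(m-j) = n+m and shrinks at every call, so 0 is never hit.
def pvFBgo (s g : List Char) : Nat → Nat → Nat → Int → Int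
  | 0, _, _, _ => 0
  | fuel + 1, i, j, l =>
    if s.drop i = g.drop j then 0
    else if s.length ≤ i then (g.length : Int) - (j : Int)
    else if g.length ≤ j then (s.length : Int) - (i : Int)
    else if l = 0 then 1
    else if s.getD i ' ' = g.getD j ' ' then pvFBgo s g fuel (i + 1) (j + 1) l
    else 1 + min (min (pvFBgo s g fuel i (j + 1) (l - 1)) (pvFBgo s g fuel (i + 1) j (l - 1)))
                 (pvFBgo s g fuel (i + 1) (j + 1) (l - 1))

def pawssible_patches_alt (start : String) (goal : String) (limit : Int) : Int :=
  let n := start.toList.length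
  let m := goal.toList.length
  let cap : Int := if 0 ≤ limit ∧ limit ≤ (n : Int) + (m : Int) then limit else (n : Int) + (m : Int)
  pvFBgo start.toList goal.toList (n + m) 0 0 cap

-- ===== PRECONDITION & SPEC =====
def Spec_pawssible_patches (start : String) (goal : String) (limit : Int) (out : Int) : Prop := out = pawssible_patches_alt start goal limit
instance (start : String) (goal : String) (limit : Int) (out : Int) : Decidable (Spec_pawssible_patches start goal limit out) := by unfold Spec_pawssible_patches; infer_instance

-- ===== CLAIM (what is proved, stated in full; the proofs are below) =====
def Claim_equal_pawssible_patches : Prop := ∀ (start : String) (goal : String) (limit : Int), Dom_pawssible_patches start goal limit → Spec_pawssible_patches start goal limit (pawssible_patches start goal limit)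

-- ===== LEMMAS AND PROOFS =====

-- one-step unfolding of pvFAgo at a successor fuel (definitional)
theorem pvFAgo_succ (fuel : Nat) (s g : List Char) (l : Int) :
    pvFAgo (fuel + 1) s g l =
      (if s = g then 0
       else match s, g with
         | [], g' => (g'.length : Int)
         | s', [] => (s'.length : Int)
         | a :: s', b :: g' =>
           if l = 0 then 1
           else if a ≠ b then
             min (min (pvFAgo fuel (a :: s') g' (l - 1) + 1) (pvFAgo fuel s' (b :: g') (l - 1) + 1))
                 (pvFAgo fuel s' g' (l - 1) + 1)
           else pvFAgo fuel s' g' l) := rfl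

-- The fuel does not matter as long as it covers |s|+|g|.
theorem pvFAgo_fuel (f1 : Nat) : ∀ (f2 : Nat) (s g : List Char) (l : Int),
    s.length + g.length ≤ f1 → s.length + g.length ≤ f2 →
    pvFAgo f1 s g l = pvFAgo f2 s g l := by
  induction f1 with
  | zero =>
    intro f2 s g l h1 h2
    have hs : s = [] := by cases s <;> simp_all
    have hg : g = [] := by cases g <;> simp_all
    subst hs; subst hg
    cases f2 <;> simp [pvFAgo]
  | succ f1 ih =>
    intro f2 s g l h1 h2
    cases f2 with
    | zero =>
      have hs : s = [] := by cases s <;> simp_all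
      have hg : g = [] := by cases g <;> simp_all
      subst hs; subst hg
      simp [pvFAgo]
    | succ f2 =>
      rw [pvFAgo_succ, pvFAgo_succ]
      by_cases hsg : s = g
      · simp [hsg]
      · match s, g with
        | [], g' => rfl
        | (a :: s'), [] => rfl
        | (a :: s'), (b :: g') =>
          simp only [List.length_cons] at h1 h2
          by_cases hl0 : l = 0
          · simp [hl0]
          · simp only [hsg, if_false, hl0]
            by_cases hab : a = b
            · simp only [hab, ne_eq, not_true_eq_false, if_false]
              exact ih f2 s' g' l (by omega) (by omega)
            · simp only [ne_eq, hab, not_false_eq_true, if_true]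
              rw [ih f2 (a :: s') g' (l - 1) (by simp only [List.length_cons]; omega)
                    (by simp only [List.length_cons]; omega),
                  ih f2 s' (b :: g') (l - 1) (by simp only [List.length_cons]; omega)
                    (by simp only [List.length_cons]; omega),
                  ih f2 s' g' (l - 1) (by omega) (by omega)]

-- When the limit is negative or at least |s|+|g|, A's `limit == 0` branch is
-- unreachable, so the result does not depend on the limit: it equals the value at -1.
theorem pvFAgo_big (f : Nat) : ∀ (s g : List Char) (l : Int),
    s.length + g.length ≤ f →
    (l < 0 ∨ ((s.length : Int) + (g.length : Int)) ≤ l) →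
    pvFAgo f s g l = pvFAgo f s g (-1) := by
  induction f with
  | zero => intro s g l _ _; rfl
  | succ f ih =>
    intro s g l hN hl
    by_cases hsg : s = g
    · rw [pvFAgo_succ, pvFAgo_succ]; simp [hsg]
    · match s, g with
      | [], g' => rfl
      | (a :: s'), [] => rfl
      | (a :: s'), (b :: g') =>
        have hlen : s'.length + g'.length + 2 ≤ f + 1 := by
          simp only [List.length_cons] at hN; omega
        have hl0 : l ≠ 0 := by
          rcases hl with h | h
          · omega
          · simp only [List.length_cons] at h; push_cast at h; omega
        rw [pvFAgo_succ, pvFAgo_succ]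
        simp only [hsg, if_false, hl0, if_false]
        have hne : (-1 : Int) ≠ 0 := by norm_num
        simp only [hne, if_false]
        by_cases hab : a = b
        · simp only [hab, ne_eq, not_true_eq_false, if_false]
          have h1 := ih s' g' l (by omega)
            (by rcases hl with h | h
                · exact Or.inl h
                · right; simp only [List.length_cons] at h; push_cast at h ⊢; omega)
          have h2 := ih s' g' (-1) (by omega) (Or.inl (by norm_num))
          rw [h1, h2]
        · simp only [ne_eq, hab, not_false_eq_true, if_true]
          have hb1 : l - 1 < 0 ∨ ((a :: s').length : Int) + (g'.length : Int) ≤ l - 1 := by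
            rcases hl with h | h
            · exact Or.inl (by omega)
            · right; simp only [List.length_cons] at h ⊢; push_cast at h ⊢; omega
          have hb2 : l - 1 < 0 ∨ ((s'.length : Int) + ((b :: g').length : Int)) ≤ l - 1 := by
            rcases hl with h | h
            · exact Or.inl (by omega)
            · right; simp only [List.length_cons] at h ⊢; push_cast at h ⊢; omega
          have hb3 : l - 1 < 0 ∨ ((s'.length : Int) + (g'.length : Int)) ≤ l - 1 := by
            rcases hl with h | h
            · exact Or.inl (by omega)
            · right; simp only [List.length_cons] at h; push_cast at h ⊢; omega
          rw [ih (a :: s') g' (l - 1) (by simp only [List.length_cons]; omega) hb1,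
              ih s' (b :: g') (l - 1) (by simp only [List.length_cons]; omega) hb2,
              ih s' g' (l - 1) (by omega) hb3,
              ih (a :: s') g' (-1 - 1) (by simp only [List.length_cons]; omega)
                (Or.inl (by norm_num)),
              ih s' (b :: g') (-1 - 1) (by simp only [List.length_cons]; omega)
                (Or.inl (by norm_num)),
              ih s' g' (-1 - 1) (by omega) (Or.inl (by norm_num)),
              ih (a :: s') g' (-1) (by simp only [List.length_cons]; omega)
                (Or.inl (by norm_num)),
              ih s' (b :: g') (-1) (by simp only [List.length_cons]; omega)
                (Or.inl (by norm_num)),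
              ih s' g' (-1) (by omega) (Or.inl (by norm_num))]

-- B's index recursion computes A's value on the corresponding suffixes.
theorem pvFBgo_eq_pvFAgo (s g : List Char) (f : Nat) : ∀ (i j : Nat) (l : Int),
    (s.length - i) + (g.length - j) ≤ f → i ≤ s.length → j ≤ g.length →
    pvFBgo s g f i j l = pvFAgo ((s.length - i) + (g.length - j)) (s.drop i) (g.drop j) l := by
  induction f with
  | zero =>
    intro i j l hN hi hj
    have hij : s.length - i = 0 ∧ g.length - j = 0 := by omega
    rw [pvFBgo]
    have hdi : s.drop i = [] := by rw [List.drop_eq_nil_iff]; omega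
    have hdj : g.drop j = [] := by rw [List.drop_eq_nil_iff]; omega
    simp [hdi, hdj, hij.1, hij.2, pvFAgo]
  | succ f ih =>
    intro i j l hN hi hj
    rw [pvFBgo]
    by_cases h1 : s.drop i = g.drop j
    · have : pvFAgo ((s.length - i) + (g.length - j)) (s.drop i) (g.drop j) l = 0 := by
        cases hk : (s.length - i) + (g.length - j) with
        | zero => rfl
        | succ k => rw [pvFAgo_succ]; simp [h1]
      rw [this]; simp [h1]
    · have hK : 0 < (s.length - i) + (g.length - j) := by
        by_contra hc
        have : s.drop i = [] := by rw [List.drop_eq_nil_iff]; omega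
        have hg0 : g.drop j = [] := by rw [List.drop_eq_nil_iff]; omega
        exact h1 (this.trans hg0.symm)
      obtain ⟨K, hKeq⟩ : ∃ K, (s.length - i) + (g.length - j) = K + 1 :=
        ⟨(s.length - i) + (g.length - j) - 1, by omega⟩
      rw [hKeq, pvFAgo_succ]
      simp only [h1, if_false]
      by_cases h2 : s.length ≤ i
      · have hdi : s.drop i = [] := by rw [List.drop_eq_nil_iff]; omega
        match hm : g.drop j with
        | [] => exact absurd (hdi.trans hm.symm) h1
        | (b :: g') =>
          have hlen : (g.drop j).length = g.length - j := List.length_drop ..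
          rw [hm] at hlen
          simp only [List.length_cons] at hlen
          simp only [h2, if_true, hdi, List.length_cons]
          push_cast
          omega
      · have hlt_i : i < s.length := by omega
        have hdi : s.drop i = s[i] :: s.drop (i + 1) := List.drop_eq_getElem_cons hlt_i
        simp only [h2, if_false]
        by_cases h3 : g.length ≤ j
        · have hdj : g.drop j = [] := by rw [List.drop_eq_nil_iff]; omega
          have hlen : (s.drop i).length = s.length - i := List.length_drop ..
          rw [hdi] at hlen
          simp only [List.length_cons] at hlen
          simp only [h3, if_true, hdj, hdi, List.length_cons]
          push_cast
          omega
        · have hlt_j : j < g.length := by omega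
          have hdj : g.drop j = g[j] :: g.drop (j + 1) := List.drop_eq_getElem_cons hlt_j
          have hgi : s.getD i ' ' = s[i] := List.getD_eq_getElem s ' ' hlt_i
          have hgj : g.getD j ' ' = g[j] := List.getD_eq_getElem g ' ' hlt_j
          simp only [h3, if_false, hdi, hdj]
          by_cases h4 : l = 0
          · simp [h4]
          · simp only [h4, if_false]
            by_cases h5 : s.getD i ' ' = g.getD j ' '
            · have hab : s[i] = g[j] := by rw [← hgi, ← hgj]; exact h5
              simp only [h5, if_true, hab, ne_eq, not_true_eq_false, if_false]
              rw [ih (i + 1) (j + 1) l (by omega) (by omega) (by omega)]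
              exact pvFAgo_fuel _ K (s.drop (i + 1)) (g.drop (j + 1)) l
                (by simp only [List.length_drop]; omega) (by simp only [List.length_drop]; omega)
            · have hab : s[i] ≠ g[j] := by rw [← hgi, ← hgj]; exact h5
              simp only [h5, if_false, ne_eq, hab, not_false_eq_true, if_true]
              rw [ih i (j + 1) (l - 1) (by omega) (by omega) (by omega),
                  ih (i + 1) j (l - 1) (by omega) (by omega) (by omega),
                  ih (i + 1) (j + 1) (l - 1) (by omega) (by omega) (by omega),
                  hdi, hdj,
                  pvFAgo_fuel ((s.length - i) + (g.length - (j + 1))) K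
                    (s[i] :: s.drop (i + 1)) (g.drop (j + 1)) (l - 1)
                    (by simp only [List.length_cons, List.length_drop]; omega)
                    (by simp only [List.length_cons, List.length_drop]; omega),
                  pvFAgo_fuel ((s.length - (i + 1)) + (g.length - j)) K
                    (s.drop (i + 1)) (g[j] :: g.drop (j + 1)) (l - 1)
                    (by simp only [List.length_cons, List.length_drop]; omega)
                    (by simp only [List.length_cons, List.length_drop]; omega),
                  pvFAgo_fuel ((s.length - (i + 1)) + (g.length - (j + 1))) K
                    (s.drop (i + 1)) (g.drop (j + 1)) (l - 1)
                    (by simp only [List.length_drop]; omega)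
                    (by simp only [List.length_drop]; omega)]
              omega

-- ===== VERDICT (by name: the statement is the Claim_ definition above) =====
theorem pawssible_patches_spec : Claim_equal_pawssible_patches := by
  intro start goal limit _
  unfold Spec_pawssible_patches pawssible_patches pawssible_patches_alt
  set s := start.toList with hs
  set g := goal.toList with hg
  rw [pvFBgo_eq_pvFAgo s g (s.length + g.length) 0 0 _ (by omega) (by omega) (by omega)]
  simp only [List.drop_zero, Nat.sub_zero]
  by_cases hc : 0 ≤ limit ∧ limit ≤ (s.length : Int) + (g.length : Int)
  · simp [hc]
  · simp only [hc, if_false]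
    rw [pvFAgo_big (s.length + g.length) s g limit le_rfl (by omega),
        pvFAgo_big (s.length + g.length) s g ((s.length : Int) + (g.length : Int)) le_rfl
          (Or.inr le_rfl)]
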